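-- pv_equiv track=rewrite | github.com/disable00/Pokrovsky-Schedule-Bot | src/pokrovsky_bot/parser.py | right_boundary
-- ===== SOURCE A (Python) =====
-- from typing import Dict, List, Optional, Tuple
--
-- def right_boundary(
--     labels: Dict[str, Tuple[int, int, int]],
--     headers: List[int],
--     label: str,
--     total_cols: int,
-- ) -> int:
--     hdr, _, subj_col = labels[label]
--     same = sorted(col for (h, _t, col) in labels.values() if h == hdr)
--     next_cols = [c for c in same if c > subj_col]
--     return min(next_cols[0] if next_cols else total_cols, total_cols)
-- ===== SOURCE B (Python) =====
-- from typing import Dict, List, Tuple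
--
-- def right_boundary(
--     labels: Dict[str, Tuple[int, int, int]],
--     headers: List[int],
--     label: str,
--     total_cols: int,
-- ) -> int:
--     hdr, _, subj_col = labels[label]
--
--     def scan(items):
--         if not items:
--             return total_cols
--         h, _t, col = items[0]
--         r = scan(items[1:])
--         return col if h == hdr and subj_col < col < r else r
--
--     return scan(list(labels.values()))
-- ===== Notes on version B (the rewrite author's own statement) =====
-- stated objective: alternative
-- what changed: Replaces sort + two intermediate filtered lists + head-or-default with a back-to-front recursive scan that keeps the running boundary and tightens it on each closer matching column.
import Mathlib
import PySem

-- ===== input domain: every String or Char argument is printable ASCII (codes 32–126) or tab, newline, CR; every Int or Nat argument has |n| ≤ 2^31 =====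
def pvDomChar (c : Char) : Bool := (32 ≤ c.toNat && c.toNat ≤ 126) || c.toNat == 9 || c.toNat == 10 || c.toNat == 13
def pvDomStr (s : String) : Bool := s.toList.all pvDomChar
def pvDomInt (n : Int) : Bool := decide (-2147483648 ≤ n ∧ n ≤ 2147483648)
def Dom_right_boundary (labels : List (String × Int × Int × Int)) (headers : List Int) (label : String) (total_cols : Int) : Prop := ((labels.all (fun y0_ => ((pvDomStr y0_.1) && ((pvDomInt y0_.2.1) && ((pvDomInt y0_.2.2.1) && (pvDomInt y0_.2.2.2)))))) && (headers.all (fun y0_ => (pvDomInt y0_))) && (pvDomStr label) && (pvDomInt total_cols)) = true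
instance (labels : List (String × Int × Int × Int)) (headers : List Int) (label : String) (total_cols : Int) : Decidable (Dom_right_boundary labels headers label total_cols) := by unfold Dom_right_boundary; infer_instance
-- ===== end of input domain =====

-- B replaces A's sort + two intermediate lists with a back-to-front recursive scan carrying the running boundary (objective: alternative).

-- ===== PORT A =====
def right_boundary (labels : List (String × Int × Int × Int)) (headers : List Int) (label : String) (total_cols : Int) : Int :=
  match (PySem.Dict.ofList labels).get? label with
  | none => 0  -- Python raises KeyError here; excluded by Pre_right_boundary
  | some (hdr, _t, subj_col) =>
    let same := PySem.List.sorted (((PySem.Dict.ofList labels).values.filter (fun v => v.1 == hdr)).map (fun v => v.2.2)) (fun c => c)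
    let next_cols := same.filter (fun c => decide (subj_col < c))
    min (match next_cols with | [] => total_cols | c :: _ => c) total_cols

-- ===== PORT B =====
-- B's inner recursive 'scan': tail result first, then tighten with the head element.
def rbScan (hdr subj total : Int) : List (Int × Int × Int) → Int
  | [] => total
  | v :: rest =>
    let r := rbScan hdr subj total rest
    if v.1 == hdr && decide (subj < v.2.2) && decide (v.2.2 < r) then v.2.2 else r

def right_boundary_alt (labels : List (String × Int × Int × Int)) (headers : List Int) (label : String) (total_cols : Int) : Int :=
  match (PySem.Dict.ofList labels).get? label with
  | none => 0  -- Python raises KeyError here; excluded by Pre_right_boundary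
  | some (hdr, _t, subj_col) => rbScan hdr subj_col total_cols (PySem.Dict.ofList labels).values

-- ===== PRECONDITION & SPEC =====
-- Pre_ excludes exactly the inputs where labels[label] raises KeyError (label not a key of the dict).
def Pre_right_boundary (labels : List (String × Int × Int × Int)) (headers : List Int) (label : String) (total_cols : Int) : Prop :=
  label ∈ labels.map Prod.fst
instance (labels : List (String × Int × Int × Int)) (headers : List Int) (label : String) (total_cols : Int) : Decidable (Pre_right_boundary labels headers label total_cols) := by unfold Pre_right_boundary; infer_instance
def pvWitness_right_boundary : (List (String × Int × Int × Int)) × List Int × String × Int :=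
  ([("a", 1, 0, 2), ("b", 1, 0, 5), ("c", 2, 0, 3)], [2, 5], "a", 9)

def Spec_right_boundary (labels : List (String × Int × Int × Int)) (headers : List Int) (label : String) (total_cols : Int) (out : Int) : Prop := out = right_boundary_alt labels headers label total_cols
instance (labels : List (String × Int × Int × Int)) (headers : List Int) (label : String) (total_cols : Int) (out : Int) : Decidable (Spec_right_boundary labels headers label total_cols out) := by unfold Spec_right_boundary; infer_instance

-- ===== CLAIM (what is proved, stated in full; the proofs are below) =====
def Claim_equal_right_boundary : Prop := ∀ (labels : List (String × Int × Int × Int)) (headers : List Int) (label : String) (total_cols : Int), Dom_right_boundary labels headers label total_cols → Pre_right_boundary labels headers label total_cols → Spec_right_boundary labels headers label total_cols (right_boundary labels headers label total_cols)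

-- ===== LEMMAS AND PROOFS =====

-- B's recursive scan equals a right fold of min over the candidate columns.
theorem rbScan_eq_foldr_min (hdr subj total : Int) (vs : List (Int × Int × Int)) :
    rbScan hdr subj total vs
      = (((vs.filter (fun v => v.1 == hdr)).map (fun v => v.2.2)).filter (fun c => decide (subj < c))).foldr min total := by
  induction vs with
  | nil => rfl
  | cons v t ih =>
    by_cases h1 : v.1 = hdr
    · by_cases h2 : subj < v.2.2
      · simp only [rbScan, List.filter_cons, List.map_cons, h1, h2, beq_self_eq_true,
          decide_true, Bool.true_and, if_true, List.foldr_cons, ← ih]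
        by_cases h3 : v.2.2 < rbScan hdr subj total t
        · simp [h3, min_eq_left (le_of_lt h3)]
        · simp [h3, min_eq_right (le_of_not_gt h3)]
      · simp [rbScan, List.filter_cons, h1, h2, ih]
    · have hf : (v.1 == hdr) = false := by simp [h1]
      simp only [rbScan, List.filter_cons, hf, Bool.false_and, Bool.false_eq_true, if_false]
      exact ih

-- pulling one min through a right fold of min
theorem foldr_min_min (b c : Int) (l : List Int) :
    l.foldr min (min b c) = min c (l.foldr min b) := by
  induction l generalizing b with
  | nil => exact min_comm b c
  | cons d t ih =>
    simp only [List.foldr_cons, ih]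
    exact min_left_comm d c (t.foldr min b)

-- left fold of min equals right fold of min
theorem foldl_min_eq_foldr_min (b : Int) (l : List Int) : l.foldl min b = l.foldr min b := by
  induction l generalizing b with
  | nil => rfl
  | cons c t ih =>
    simp only [List.foldl_cons, List.foldr_cons, ih, foldr_min_min]

-- folding min over a list whose elements all dominate the accumulator leaves it unchanged
theorem foldl_min_of_le (a : Int) (l : List Int) (h : ∀ x ∈ l, a ≤ x) : l.foldl min a = a := by
  induction l with
  | nil => rfl
  | cons c t ih =>
    have hc : min a c = a := min_eq_left (h c (by simp))
    simp only [List.foldl_cons, hc]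
    exact ih (fun x hx => h x (by simp [hx]))

-- the common core: head-of-sorted-filtered (capped) equals B's back-to-front scan, for any value list
theorem core_eq (hdr subj total : Int) (vs : List (Int × Int × Int)) :
    min (match (PySem.List.sorted ((vs.filter (fun v => v.1 == hdr)).map (fun v => v.2.2)) (fun c => c)).filter (fun c => decide (subj < c)) with | [] => total | c :: _ => c) total
      = rbScan hdr subj total vs := by
  rw [rbScan_eq_foldr_min, ← foldl_min_eq_foldr_min]
  set L := (vs.filter (fun v => v.1 == hdr)).map (fun v => v.2.2) with hL
  have hperm : ((PySem.List.sorted L (fun c => c)).filter (fun c => decide (subj < c))).Perm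
      (L.filter (fun c => decide (subj < c))) := ((PySem.List.sorted_perm L (fun c => c) false).filter _)
  rw [← hperm.foldl_eq total]
  have hpw : ((PySem.List.sorted L (fun c => c)).filter (fun c => decide (subj < c))).Pairwise (· ≤ ·) :=
    (PySem.List.sorted_pairwise L (fun c => c)).filter _
  cases hc : (PySem.List.sorted L (fun c => c)).filter (fun c => decide (subj < c)) with
  | nil => simp
  | cons c t =>
    rw [hc] at hpw
    simp only [List.foldl_cons]
    rw [foldl_min_of_le (min total c) t
      (fun x hx => le_trans (min_le_right total c) ((List.pairwise_cons.mp hpw).1 x hx))]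
    exact min_comm c total

-- ===== VERDICT (by name: the statement is the Claim_ definition above) =====
theorem right_boundary_spec : Claim_equal_right_boundary := by
  intro labels headers label total_cols _hdom hpre
  unfold Spec_right_boundary right_boundary right_boundary_alt
  have hk : (PySem.Dict.ofList labels).get? label = none ↔ label ∉ labels.map Prod.fst := by
    rw [PySem.Dict.get?_eq_none_iff_not_mem_keys]
    simp [PySem.Dict.ofList, PySem.Dict.update, PySem.Dict.keys_foldl_insert_key]
  cases hg : (PySem.Dict.ofList labels).get? label with
  | none => exact absurd hpre (hk.mp hg)
  | some p =>
    obtain ⟨hdr, _t, subj_col⟩ := p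
    exact core_eq hdr subj_col total_cols (PySem.Dict.values (PySem.Dict.ofList labels))
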